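-- pv_equiv track=rewrite | github.com/MrBrantCode/unitest_baseline | mut_generate/mist_train_taco/taco_15313/solution.py | is_valid_social_golfer_solution
-- ===== SOURCE A (Python) =====
-- def is_valid_social_golfer_solution(solution):
--     # Dictionary to track the groups each golfer has played in
--     golfer_groups = {}
--
--     # Extract the number of days and the number of groups per day
--     num_days = len(solution)
--     if num_days == 0:
--         return True  # Vacuously true for zero golfers
--
--     num_groups_per_day = len(solution[0])
--     if num_groups_per_day == 0:
--         return False  # No groups means no valid solution
--
--     group_size = len(solution[0][0])
--     if group_size == 0:
--         return False  # No golfers in a group means no valid solution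
--
--     # Set of all golfers
--     all_golfers = {golfer for group in solution[0] for golfer in group}
--
--     # Validate each day
--     for day in solution:
--         if len(day) != num_groups_per_day:
--             return False  # Number of groups per day must be consistent
--
--         for group in day:
--             if len(group) != group_size:
--                 return False  # Group size must be consistent
--
--             for golfer in group:
--                 if golfer not in all_golfers:
--                     return False  # All golfers must be known
--
--                 if golfer not in golfer_groups:
--                     golfer_groups[golfer] = set(group) - {golfer}
--                 else:
--                     if len(golfer_groups[golfer] & (set(group) - {golfer})) > 0:
--                         return False  # Golfer cannot play with the same person more than once
--                     golfer_groups[golfer].update(set(group) - {golfer})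
--
--     return True
-- ===== SOURCE B (Python) =====
-- def is_valid_social_golfer_solution(solution):
--     num_days = len(solution)
--     if num_days == 0:
--         return True  # Vacuously true for zero golfers
--
--     num_groups_per_day = len(solution[0])
--     if num_groups_per_day == 0:
--         return False
--
--     group_size = len(solution[0][0])
--     if group_size == 0:
--         return False
--
--     all_golfers = {golfer for group in solution[0] for golfer in group}
--
--     seen_pairs = set()  # one global set of unordered partner pairs
--     for day in solution:
--         if len(day) != num_groups_per_day:
--             return False
--
--         for group in day:
--             if len(group) != group_size:
--                 return False
--
--             for golfer in group:
--                 if golfer not in all_golfers: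
--                     return False
--
--             # walk the group positionally: head against every later entry
--             rest = group
--             while rest:
--                 a, rest = rest[0], rest[1:]
--                 for b in rest:
--                     if a != b:
--                         pair = (a, b) if a < b else (b, a)
--                         if pair in seen_pairs:
--                             return False
--                         seen_pairs.add(pair)
--     return True
-- ===== Notes on version B (the rewrite author's own statement) =====
-- stated objective: faster
-- what changed: The per-golfer dict of partner sets (building set(group)-{golfer}, an intersection and an update for every golfer occurrence) is replaced by a single global set of canonical (min,max) partner pairs, enumerating each group's position pairs once with one membership test and one add per pair.
import Mathlib
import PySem

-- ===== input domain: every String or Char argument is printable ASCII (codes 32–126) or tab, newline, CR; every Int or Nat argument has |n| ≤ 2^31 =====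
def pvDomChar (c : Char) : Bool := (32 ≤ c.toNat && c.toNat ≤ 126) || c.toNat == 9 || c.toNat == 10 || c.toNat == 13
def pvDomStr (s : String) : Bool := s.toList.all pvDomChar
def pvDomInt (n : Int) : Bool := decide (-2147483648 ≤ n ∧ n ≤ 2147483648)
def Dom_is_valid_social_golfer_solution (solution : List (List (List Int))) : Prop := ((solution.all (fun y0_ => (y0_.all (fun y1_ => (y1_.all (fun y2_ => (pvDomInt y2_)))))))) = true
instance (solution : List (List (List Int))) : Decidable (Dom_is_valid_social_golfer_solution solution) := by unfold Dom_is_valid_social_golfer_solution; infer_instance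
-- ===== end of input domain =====

-- B replaces A's per-golfer dict of partner sets by one global set of canonical (min,max)
-- partner pairs; equivalence of the two validity checks is proved for every input (both are total).

-- ===== PORT A =====
-- 'set(group) - {golfer}' of the Python
def aPartners (group : List Int) (g : Int) : PySem.Set Int :=
  PySem.Set.diff (PySem.Set.ofList group) [g]

-- inner 'for golfer in group' loop: none = 'return False', some d = fall through with dict d
def aGolfers (allG : PySem.Set Int) (group : List Int) :
    List Int → PySem.Dict Int (PySem.Set Int) → Option (PySem.Dict Int (PySem.Set Int))
  | [], d => some d
  | g :: gs, d =>
    if ¬ PySem.Set.contains allG g then none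
    else
      match d.get? g with
      | none => aGolfers allG group gs (d.insert g (aPartners group g))
      | some cur =>
        if 0 < PySem.Set.len (PySem.Set.inter cur (aPartners group g)) then none
        else aGolfers allG group gs (d.insert g (PySem.Set.update cur (aPartners group g)))

-- 'for group in day' loop
def aGroups (allG : PySem.Set Int) (gsz : Nat) :
    List (List Int) → PySem.Dict Int (PySem.Set Int) → Option (PySem.Dict Int (PySem.Set Int))
  | [], d => some d
  | grp :: rest, d =>
    if grp.length ≠ gsz then none
    else
      match aGolfers allG grp grp d with
      | none => none
      | some d' => aGroups allG gsz rest d'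

-- 'for day in solution' loop
def aDays (allG : PySem.Set Int) (ng gsz : Nat) :
    List (List (List Int)) → PySem.Dict Int (PySem.Set Int) → Option (PySem.Dict Int (PySem.Set Int))
  | [], d => some d
  | day :: rest, d =>
    if day.length ≠ ng then none
    else
      match aGroups allG gsz day d with
      | none => none
      | some d' => aDays allG ng gsz rest d'

def is_valid_social_golfer_solution (solution : List (List (List Int))) : Bool :=
  match solution with
  | [] => true
  | day0 :: _ =>
    match day0 with
    | [] => false
    | g0 :: _ =>
      if g0.length = 0 then false
      else
        (aDays (PySem.Set.ofList (day0.flatMap (fun g => g))) day0.length g0.length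
          solution PySem.Dict.empty).isSome

-- ===== PORT B =====
-- '(a, b) if a < b else (b, a)'
def canonPair (a b : Int) : Int × Int := if a < b then (a, b) else (b, a)

-- inner 'for b in rest' loop of Source B
def bPartnerScan (a : Int) : List Int → PySem.Set (Int × Int) → Option (PySem.Set (Int × Int))
  | [], s => some s
  | b :: bs, s =>
    if a ≠ b then
      if PySem.Set.contains s (canonPair a b) then none
      else bPartnerScan a bs (PySem.Set.add s (canonPair a b))
    else bPartnerScan a bs s

-- the 'while rest:' peeling loop of Source B
def bGroupPairs : List Int → PySem.Set (Int × Int) → Option (PySem.Set (Int × Int))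
  | [], s => some s
  | a :: rest, s =>
    match bPartnerScan a rest s with
    | none => none
    | some s' => bGroupPairs rest s'

def bGroups (allG : PySem.Set Int) (gsz : Nat) :
    List (List Int) → PySem.Set (Int × Int) → Option (PySem.Set (Int × Int))
  | [], s => some s
  | grp :: rest, s =>
    if grp.length ≠ gsz then none
    else if ¬ grp.all (fun g => PySem.Set.contains allG g) then none
    else
      match bGroupPairs grp s with
      | none => none
      | some s' => bGroups allG gsz rest s'

def bDays (allG : PySem.Set Int) (ng gsz : Nat) :
    List (List (List Int)) → PySem.Set (Int × Int) → Option (PySem.Set (Int × Int))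
  | [], s => some s
  | day :: rest, s =>
    if day.length ≠ ng then none
    else
      match bGroups allG gsz day s with
      | none => none
      | some s' => bDays allG ng gsz rest s'

def is_valid_social_golfer_solution_alt (solution : List (List (List Int))) : Bool :=
  match solution with
  | [] => true
  | day0 :: _ =>
    match day0 with
    | [] => false
    | g0 :: _ =>
      if g0.length = 0 then false
      else
        (bDays (PySem.Set.ofList (day0.flatMap (fun g => g))) day0.length g0.length
          solution PySem.Set.empty).isSome

-- ===== PRECONDITION & SPEC =====
def Spec_is_valid_social_golfer_solution (solution : List (List (List Int))) (out : Bool) : Prop := out = is_valid_social_golfer_solution_alt solution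
instance (solution : List (List (List Int))) (out : Bool) : Decidable (Spec_is_valid_social_golfer_solution solution out) := by unfold Spec_is_valid_social_golfer_solution; infer_instance

-- ===== CLAIM (what is proved, stated in full; the proofs are below) =====
def Claim_equal_is_valid_social_golfer_solution : Prop := ∀ (solution : List (List (List Int))), Dom_is_valid_social_golfer_solution solution → Spec_is_valid_social_golfer_solution solution (is_valid_social_golfer_solution solution)

-- ===== LEMMAS AND PROOFS =====

-- the simulation relation: A's partner dict and B's pair set record the same unordered pairs
def SGRel (d : PySem.Dict Int (PySem.Set Int)) (s : PySem.Set (Int × Int)) : Prop :=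
  ∀ g h : Int, g ≠ h → (h ∈ d.getD g PySem.Set.empty ↔ canonPair g h ∈ s)

lemma canon_comm (a b : Int) : canonPair a b = canonPair b a := by
  unfold canonPair; split_ifs <;> simp_all <;> omega

lemma canon_eq_iff {a b c d : Int} (hab : a ≠ b) (hcd : c ≠ d) :
    canonPair a b = canonPair c d ↔ (a = c ∧ b = d) ∨ (a = d ∧ b = c) := by
  unfold canonPair; split_ifs <;> simp [Prod.ext_iff] <;> omega

lemma mem_aPartners (group : List Int) (g x : Int) :
    x ∈ aPartners group g ↔ x ∈ group ∧ x ≠ g := by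
  simp [aPartners, PySem.Set.mem_diff, PySem.Set.mem_ofList]

lemma dup_cons (g : Int) (gs : List Int) (Pt : Int → Prop) :
    (∃ x, 2 ≤ (g :: gs).count x ∧ Pt x) ↔
      (g ∈ gs ∧ Pt g) ∨ (∃ x, 2 ≤ gs.count x ∧ Pt x) := by
  constructor
  · rintro ⟨x, hc, hp⟩
    by_cases hx : x = g
    · subst hx
      rw [List.count_cons_self] at hc
      exact Or.inl ⟨List.count_pos_iff.1 (by omega), hp⟩
    · rw [List.count_cons, if_neg (by simp; exact fun e => hx e.symm)] at hc
      exact Or.inr ⟨x, by omega, hp⟩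
  · rintro (⟨hmem, hp⟩ | ⟨x, hc, hp⟩)
    · refine ⟨g, ?_, hp⟩
      rw [List.count_cons_self]
      have := List.count_pos_iff.2 hmem
      omega
    · refine ⟨x, ?_, hp⟩
      rw [List.count_cons]
      omega

lemma len_pos_iff (t : PySem.Set Int) : 0 < PySem.Set.len t ↔ ∃ x, x ∈ t := by
  show 0 < (t.length : Int) ↔ _
  rw [Int.natCast_pos, List.length_pos_iff]
  constructor
  · intro h; exact t.exists_mem_of_ne_nil h
  · rintro ⟨x, hx⟩; exact List.ne_nil_of_mem hx

lemma getD_insert_mem (d : PySem.Dict Int (PySem.Set Int)) (g x h : Int) (v : PySem.Set Int) :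
    (h ∈ (d.insert g v).getD x PySem.Set.empty ↔
      (x = g ∧ h ∈ v) ∨ (x ≠ g ∧ h ∈ d.getD x PySem.Set.empty)) := by
  rw [PySem.Dict.getD_insert]
  by_cases hx : x = g
  · simp [hx]
  · simp [hx]

lemma getD_of_get?_none (d : PySem.Dict Int (PySem.Set Int)) (g : Int)
    (h : d.get? g = none) : d.getD g PySem.Set.empty = PySem.Set.empty := by
  simp [PySem.Dict.getD, h]

lemma getD_of_get?_some (d : PySem.Dict Int (PySem.Set Int)) (g : Int) (cur : PySem.Set Int)
    (h : d.get? g = some cur) : d.getD g PySem.Set.empty = cur := by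
  simp [PySem.Dict.getD, h]

lemma aGolfers_spec (allG : PySem.Set Int) (group : List Int) :
    ∀ (gs : List Int) (d : PySem.Dict Int (PySem.Set Int)),
      (aGolfers allG group gs d = none ↔
        (∃ g ∈ gs, ¬ PySem.Set.contains allG g = true) ∨
        (∃ g ∈ gs, ∃ h ∈ group, h ≠ g ∧ h ∈ d.getD g PySem.Set.empty) ∨
        (∃ g, 2 ≤ gs.count g ∧ ∃ h ∈ group, h ≠ g)) ∧
      (∀ d', aGolfers allG group gs d = some d' →
        ∀ g h : Int, (h ∈ d'.getD g PySem.Set.empty ↔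
          h ∈ d.getD g PySem.Set.empty ∨ (g ∈ gs ∧ h ∈ group ∧ h ≠ g))) := by
  intro gs
  induction gs with
  | nil =>
    intro d
    refine ⟨by simp [aGolfers], ?_⟩
    intro d' hd' g h
    simp only [aGolfers, Option.some.injEq] at hd'
    subst hd'; simp
  | cons g gs ih =>
    intro d
    have hdup := dup_cons g gs (fun x => ∃ h ∈ group, h ≠ x)
    by_cases hg : PySem.Set.contains allG g = true
    · cases hget : d.get? g with
      | none =>
        have hstep : aGolfers allG group (g :: gs) d
            = aGolfers allG group gs (d.insert g (aPartners group g)) := by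
          simp only [aGolfers, hget, if_neg (not_not_intro hg)]
        have hgd : d.getD g PySem.Set.empty = PySem.Set.empty := getD_of_get?_none d g hget
        have hd1 : ∀ x h : Int, h ∈ (d.insert g (aPartners group g)).getD x PySem.Set.empty ↔
            (x = g ∧ h ∈ group ∧ h ≠ g) ∨ (x ≠ g ∧ h ∈ d.getD x PySem.Set.empty) := by
          intro x h
          rw [getD_insert_mem, mem_aPartners]
        refine ⟨?_, ?_⟩
        · rw [hstep, (ih _).1]
          constructor
          · rintro (⟨x, hx, hnc⟩ | ⟨x, hx, h, hh, hne, hm⟩ | ⟨x, hc, hp⟩)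
            · exact Or.inl ⟨x, List.mem_cons_of_mem _ hx, hnc⟩
            · rcases (hd1 x h).1 hm with ⟨hxg, hh2, hne2⟩ | ⟨_, hm'⟩
              · exact Or.inr (Or.inr (hdup.2 (Or.inl ⟨hxg ▸ hx, h, hh, hxg ▸ hne⟩)))
              · exact Or.inr (Or.inl ⟨x, List.mem_cons_of_mem _ hx, h, hh, hne, hm'⟩)
            · exact Or.inr (Or.inr (hdup.2 (Or.inr ⟨x, hc, hp⟩)))
          · rintro (⟨x, hx, hnc⟩ | ⟨x, hx, h, hh, hne, hm⟩ | hd)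
            · rcases List.mem_cons.1 hx with hxg | hx'
              · exact absurd (hxg ▸ hnc) (fun c => c hg)
              · exact Or.inl ⟨x, hx', hnc⟩
            · rcases List.mem_cons.1 hx with hxg | hx'
              · rw [hxg, hgd] at hm
                exact absurd hm (by simp)
              · by_cases hxg2 : x = g
                · rw [hxg2, hgd] at hm
                  exact absurd hm (by simp)
                · exact Or.inr (Or.inl ⟨x, hx', h, hh, hne, (hd1 x h).2 (Or.inr ⟨hxg2, hm⟩)⟩)
            · rcases hdup.1 hd with ⟨hmem, h, hh, hne⟩ | ⟨x, hc, hp⟩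
              · exact Or.inr (Or.inl ⟨g, hmem, h, hh, hne, (hd1 g h).2 (Or.inl ⟨rfl, hh, hne⟩)⟩)
              · exact Or.inr (Or.inr ⟨x, hc, hp⟩)
        · intro d' hd' x h
          rw [hstep] at hd'
          rw [(ih _).2 d' hd' x h, hd1 x h]
          constructor
          · rintro ((⟨hxg, hh, hne⟩ | ⟨_, hm⟩) | ⟨hx, hh, hne⟩)
            · exact Or.inr ⟨List.mem_cons.2 (Or.inl hxg), hh, hxg.symm ▸ hne⟩
            · exact Or.inl hm
            · exact Or.inr ⟨List.mem_cons_of_mem _ hx, hh, hne⟩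
          · rintro (hm | ⟨hx, hh, hne⟩)
            · by_cases hxg : x = g
              · rw [hxg, hgd] at hm
                exact absurd hm (by simp)
              · exact Or.inl (Or.inr ⟨hxg, hm⟩)
            · rcases List.mem_cons.1 hx with hxg | hx'
              · exact Or.inl (Or.inl ⟨hxg, hh, hxg ▸ hne⟩)
              · exact Or.inr ⟨hx', hh, hne⟩
      | some cur =>
        have hgd : d.getD g PySem.Set.empty = cur := getD_of_get?_some d g cur hget
        by_cases hconf : 0 < PySem.Set.len (PySem.Set.inter cur (aPartners group g))
        · have hstep : aGolfers allG group (g :: gs) d = none := by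
            simp only [aGolfers, hget, if_neg (not_not_intro hg), if_pos hconf]
          rcases (len_pos_iff _).1 hconf with ⟨x, hx⟩
          rw [PySem.Set.mem_inter] at hx
          rcases hx with ⟨hxc, hxp⟩
          rw [mem_aPartners] at hxp
          refine ⟨?_, ?_⟩
          · rw [hstep]
            simp only [true_iff]
            exact Or.inr (Or.inl ⟨g, List.mem_cons_self, x, hxp.1, hxp.2, hgd ▸ hxc⟩)
          · intro d' hd'
            rw [hstep] at hd'; exact absurd hd' (by simp)
        · have hstep : aGolfers allG group (g :: gs) d
              = aGolfers allG group gs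
                  (d.insert g (PySem.Set.update cur (aPartners group g))) := by
            simp only [aGolfers, hget, if_neg (not_not_intro hg), if_neg hconf]
          have hnc : ¬ ∃ h ∈ group, h ≠ g ∧ h ∈ cur := by
            rintro ⟨h, hh, hne, hc⟩
            exact hconf ((len_pos_iff _).2
              ⟨h, (PySem.Set.mem_inter _ _ _).2 ⟨hc, (mem_aPartners group g h).2 ⟨hh, hne⟩⟩⟩)
          have hd1 : ∀ x h : Int,
              h ∈ (d.insert g (PySem.Set.update cur (aPartners group g))).getD x PySem.Set.empty ↔
              (x = g ∧ (h ∈ cur ∨ (h ∈ group ∧ h ≠ g))) ∨ (x ≠ g ∧ h ∈ d.getD x PySem.Set.empty) := by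
            intro x h
            rw [getD_insert_mem]
            constructor
            · rintro (⟨hxg, hm⟩ | hr)
              · rw [PySem.Set.mem_update] at hm
                rcases hm with hm | hm
                · exact Or.inl ⟨hxg, Or.inl hm⟩
                · exact Or.inl ⟨hxg, Or.inr ((mem_aPartners group g h).1 hm)⟩
              · exact Or.inr hr
            · rintro (⟨hxg, hm | hm⟩ | hr)
              · exact Or.inl ⟨hxg, (PySem.Set.mem_update _ _ _).2 (Or.inl hm)⟩
              · exact Or.inl ⟨hxg, (PySem.Set.mem_update _ _ _).2
                  (Or.inr ((mem_aPartners group g h).2 hm))⟩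
              · exact Or.inr hr
          refine ⟨?_, ?_⟩
          · rw [hstep, (ih _).1]
            constructor
            · rintro (⟨x, hx, hncx⟩ | ⟨x, hx, h, hh, hne, hm⟩ | ⟨x, hc, hp⟩)
              · exact Or.inl ⟨x, List.mem_cons_of_mem _ hx, hncx⟩
              · rcases (hd1 x h).1 hm with ⟨hxg, hm' | ⟨hh2, hne2⟩⟩ | ⟨_, hm'⟩
                · exact absurd ⟨h, hh, hxg ▸ hne, hm'⟩ hnc
                · exact Or.inr (Or.inr (hdup.2 (Or.inl ⟨hxg ▸ hx, h, hh, hxg ▸ hne⟩)))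
                · exact Or.inr (Or.inl ⟨x, List.mem_cons_of_mem _ hx, h, hh, hne, hm'⟩)
              · exact Or.inr (Or.inr (hdup.2 (Or.inr ⟨x, hc, hp⟩)))
            · rintro (⟨x, hx, hncx⟩ | ⟨x, hx, h, hh, hne, hm⟩ | hd)
              · rcases List.mem_cons.1 hx with hxg | hx'
                · exact absurd (hxg ▸ hncx) (fun c => c hg)
                · exact Or.inl ⟨x, hx', hncx⟩
              · rcases List.mem_cons.1 hx with hxg | hx'
                · rw [hxg, hgd] at hm
                  exact absurd ⟨h, hh, hxg ▸ hne, hm⟩ hnc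
                · by_cases hxg2 : x = g
                  · rw [hxg2, hgd] at hm
                    exact absurd ⟨h, hh, hxg2 ▸ hne, hm⟩ hnc
                  · exact Or.inr (Or.inl ⟨x, hx', h, hh, hne, (hd1 x h).2 (Or.inr ⟨hxg2, hm⟩)⟩)
              · rcases hdup.1 hd with ⟨hmem, h, hh, hne⟩ | ⟨x, hc, hp⟩
                · exact Or.inr (Or.inl ⟨g, hmem, h, hh, hne,
                    (hd1 g h).2 (Or.inl ⟨rfl, Or.inr ⟨hh, hne⟩⟩)⟩)
                · exact Or.inr (Or.inr ⟨x, hc, hp⟩)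
          · intro d' hd' x h
            rw [hstep] at hd'
            rw [(ih _).2 d' hd' x h, hd1 x h]
            constructor
            · rintro ((⟨hxg, hm | ⟨hh, hne⟩⟩ | ⟨_, hm⟩) | ⟨hx, hh, hne⟩)
              · exact Or.inl (by rw [hxg, hgd]; exact hm)
              · exact Or.inr ⟨List.mem_cons.2 (Or.inl hxg), hh, hxg.symm ▸ hne⟩
              · exact Or.inl hm
              · exact Or.inr ⟨List.mem_cons_of_mem _ hx, hh, hne⟩
            · rintro (hm | ⟨hx, hh, hne⟩)
              · by_cases hxg : x = g
                · exact Or.inl (Or.inl ⟨hxg, Or.inl (by rw [hxg, hgd] at hm; exact hm)⟩)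
                · exact Or.inl (Or.inr ⟨hxg, hm⟩)
              · rcases List.mem_cons.1 hx with hxg | hx'
                · exact Or.inl (Or.inl ⟨hxg, Or.inr ⟨hh, hxg ▸ hne⟩⟩)
                · exact Or.inr ⟨hx', hh, hne⟩
    · have hstep : aGolfers allG group (g :: gs) d = none := by
        simp only [aGolfers, if_pos hg]
      refine ⟨?_, ?_⟩
      · rw [hstep]
        simp only [true_iff]
        exact Or.inl ⟨g, List.mem_cons_self, hg⟩
      · intro d' hd'
        rw [hstep] at hd'; exact absurd hd' (by simp)

lemma canon_eq_canon_iff {a b b' : Int} (hab : a ≠ b) (hab' : a ≠ b') :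
    canonPair a b' = canonPair a b ↔ b' = b := by
  constructor
  · intro h
    rcases (canon_eq_iff hab' hab).1 h with ⟨_, h2⟩ | ⟨h1, h2⟩
    · exact h2
    · omega
  · rintro rfl; rfl

lemma bPartnerScan_spec (a : Int) :
    ∀ (bs : List Int) (s : PySem.Set (Int × Int)),
      (bPartnerScan a bs s = none ↔
        (∃ b ∈ bs, a ≠ b ∧ canonPair a b ∈ s) ∨ (∃ b, 2 ≤ bs.count b ∧ a ≠ b)) ∧
      (∀ s', bPartnerScan a bs s = some s' →
        ∀ x, x ∈ s' ↔ x ∈ s ∨ ∃ b ∈ bs, a ≠ b ∧ x = canonPair a b) := by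
  intro bs
  induction bs with
  | nil =>
    intro s
    refine ⟨by simp [bPartnerScan], ?_⟩
    intro s' hs' x
    simp only [bPartnerScan, Option.some.injEq] at hs'
    subst hs'; simp
  | cons b bs ih =>
    intro s
    have hdup := dup_cons b bs (fun x => a ≠ x)
    by_cases hab : a = b
    · have hstep : bPartnerScan a (b :: bs) s = bPartnerScan a bs s := by
        simp [bPartnerScan, hab]
      constructor
      · rw [hstep, (ih s).1, hdup]
        simp only [List.mem_cons]
        constructor
        · rintro (⟨b', hb', hne, hm⟩ | hd)
          · exact Or.inl ⟨b', Or.inr hb', hne, hm⟩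
          · exact Or.inr (Or.inr hd)
        · rintro (⟨b', hb' | hb', hne, hm⟩ | ⟨_, hne⟩ | hd)
          · exact absurd (hb' ▸ hab) hne
          · exact Or.inl ⟨b', hb', hne, hm⟩
          · exact absurd hab hne
          · exact Or.inr hd
      · intro s' hs' x
        rw [hstep] at hs'
        rw [(ih s).2 s' hs' x]
        simp only [List.mem_cons]
        constructor
        · rintro (hx | ⟨b', hb', hne, hm⟩)
          · exact Or.inl hx
          · exact Or.inr ⟨b', Or.inr hb', hne, hm⟩
        · rintro (hx | ⟨b', hb' | hb', hne, hm⟩)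
          · exact Or.inl hx
          · exact absurd (hb' ▸ hab) hne
          · exact Or.inr ⟨b', hb', hne, hm⟩
    · by_cases hc : canonPair a b ∈ s
      · have hstep : bPartnerScan a (b :: bs) s = none := by
          simp only [bPartnerScan, if_pos hab,
            if_pos ((PySem.Set.contains_iff s (canonPair a b)).2 hc)]
        constructor
        · rw [hstep]
          simp only [List.mem_cons, true_iff]
          exact Or.inl ⟨b, Or.inl rfl, hab, hc⟩
        · intro s' hs'
          rw [hstep] at hs'; exact absurd hs' (by simp)
      · have hstep : bPartnerScan a (b :: bs) s
            = bPartnerScan a bs (PySem.Set.add s (canonPair a b)) := by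
          have hcf : ¬ (PySem.Set.contains s (canonPair a b) = true) :=
            fun h => hc ((PySem.Set.contains_iff s (canonPair a b)).1 h)
          simp only [bPartnerScan, if_pos hab, if_neg hcf]
        have hmem : ∀ b', a ≠ b' →
            (canonPair a b' ∈ PySem.Set.add s (canonPair a b) ↔
              canonPair a b' ∈ s ∨ b' = b) := by
          intro b' hab'
          rw [PySem.Set.mem_add]
          exact or_congr Iff.rfl (canon_eq_canon_iff hab hab')
        constructor
        · rw [hstep, (ih _).1, hdup]
          simp only [List.mem_cons]
          constructor
          · rintro (⟨b', hb', hne, hm⟩ | hd)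
            · rcases (hmem b' hne).1 hm with hm' | rfl
              · exact Or.inl ⟨b', Or.inr hb', hne, hm'⟩
              · exact Or.inr (Or.inl ⟨hb', hne⟩)
            · exact Or.inr (Or.inr hd)
          · rintro (⟨b', hb' | hb', hne, hm⟩ | ⟨hbbs, hne⟩ | hd)
            · subst hb'; exact absurd hm hc
            · exact Or.inl ⟨b', hb', hne, (hmem b' hne).2 (Or.inl hm)⟩
            · exact Or.inl ⟨b, hbbs, hne, (hmem b hne).2 (Or.inr rfl)⟩
            · exact Or.inr hd
        · intro s' hs' x
          rw [hstep] at hs'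
          rw [(ih _).2 s' hs' x, PySem.Set.mem_add]
          simp only [List.mem_cons]
          constructor
          · rintro ((hx | rfl) | ⟨b', hb', hne, hm⟩)
            · exact Or.inl hx
            · exact Or.inr ⟨b, Or.inl rfl, hab, rfl⟩
            · exact Or.inr ⟨b', Or.inr hb', hne, hm⟩
          · rintro (hx | ⟨b', hb' | hb', hne, hm⟩)
            · exact Or.inl (Or.inl hx)
            · subst hb'; exact Or.inl (Or.inr hm)
            · exact Or.inr ⟨b', hb', hne, hm⟩

lemma pairterm_cons (P : Int → Int → Prop) (hsymm : ∀ u v, P u v → P v u)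
    (a : Int) (rest : List Int) :
    (∃ u ∈ a :: rest, ∃ v ∈ a :: rest, u ≠ v ∧ P u v) ↔
      (∃ b ∈ rest, a ≠ b ∧ P a b) ∨
      (∃ u ∈ rest, ∃ v ∈ rest, u ≠ v ∧ P u v) := by
  constructor
  · rintro ⟨u, hu, v, hv, huv, hm⟩
    rcases List.mem_cons.1 hu with hua | hu' <;> rcases List.mem_cons.1 hv with hva | hv'
    · exact absurd (hua.trans hva.symm) huv
    · exact Or.inl ⟨v, hv', hua ▸ huv, hua ▸ hm⟩
    · exact Or.inl ⟨u, hu', fun e => (hva ▸ huv) e.symm, hsymm u a (hva ▸ hm)⟩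
    · exact Or.inr ⟨u, hu', v, hv', huv, hm⟩
  · rintro (⟨b, hb, hne, hm⟩ | ⟨u, hu, v, hv, huv, hm⟩)
    · exact ⟨a, List.mem_cons_self, b, List.mem_cons_of_mem _ hb, hne, hm⟩
    · exact ⟨u, List.mem_cons_of_mem _ hu, v, List.mem_cons_of_mem _ hv, huv, hm⟩

lemma dupP_cons (a : Int) (rest : List Int) :
    (∃ g, 2 ≤ (a :: rest).count g ∧ ∃ h ∈ a :: rest, h ≠ g) ↔
      (a ∈ rest ∧ ∃ h ∈ rest, h ≠ a) ∨ (∃ g, 2 ≤ rest.count g ∧ a ≠ g) ∨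
      (∃ g, 2 ≤ rest.count g ∧ ∃ h ∈ rest, h ≠ g) := by
  constructor
  · intro hd
    rcases (dup_cons a rest (fun g => ∃ h ∈ a :: rest, h ≠ g)).1 hd with ⟨ha, h, hh, hne⟩ | ⟨g, hc, h, hh, hne⟩
    · rcases List.mem_cons.1 hh with hha | hh'
      · exact absurd hha hne
      · exact Or.inl ⟨ha, h, hh', hne⟩
    · rcases List.mem_cons.1 hh with hha | hh'
      · exact Or.inr (Or.inl ⟨g, hc, hha ▸ hne⟩)
      · exact Or.inr (Or.inr ⟨g, hc, h, hh', hne⟩)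
  · rintro (⟨ha, h, hh, hne⟩ | ⟨g, hc, hne⟩ | ⟨g, hc, h, hh, hne⟩)
    · refine ⟨a, ?_, h, List.mem_cons_of_mem _ hh, hne⟩
      rw [List.count_cons_self]
      have := List.count_pos_iff.2 ha
      omega
    · refine ⟨g, ?_, a, List.mem_cons_self, hne⟩
      rw [List.count_cons]
      omega
    · refine ⟨g, ?_, h, List.mem_cons_of_mem _ hh, hne⟩
      rw [List.count_cons]
      omega

lemma bGroupPairs_spec :
    ∀ (gs : List Int) (s : PySem.Set (Int × Int)),
      (bGroupPairs gs s = none ↔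
        (∃ a ∈ gs, ∃ b ∈ gs, a ≠ b ∧ canonPair a b ∈ s) ∨
        (∃ g, 2 ≤ gs.count g ∧ ∃ h ∈ gs, h ≠ g)) ∧
      (∀ s', bGroupPairs gs s = some s' →
        ∀ x, x ∈ s' ↔ x ∈ s ∨ ∃ a ∈ gs, ∃ b ∈ gs, a ≠ b ∧ x = canonPair a b) := by
  intro gs
  induction gs with
  | nil =>
    intro s
    refine ⟨by simp [bGroupPairs], ?_⟩
    intro s' hs' x
    simp only [bGroupPairs, Option.some.injEq] at hs'
    subst hs'; simp
  | cons a rest ih =>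
    intro s
    have hmemP : ∀ (t : PySem.Set (Int × Int)) u v, canonPair u v ∈ t → canonPair v u ∈ t :=
      fun t u v h => canon_comm u v ▸ h
    have heqP : ∀ (x : Int × Int) u v, x = canonPair u v → x = canonPair v u :=
      fun x u v h => (canon_comm u v) ▸ h
    have hps := bPartnerScan_spec a rest s
    cases hscan : bPartnerScan a rest s with
    | none =>
      have hF := (hps.1).1 hscan
      have hstep : bGroupPairs (a :: rest) s = none := by
        simp only [bGroupPairs, hscan]
      constructor
      · rw [hstep]
        simp only [true_iff]
        rcases hF with ⟨b, hb, hne, hm⟩ | ⟨b, hc, hne⟩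
        · exact Or.inl ((pairterm_cons _ (hmemP s) a rest).2 (Or.inl ⟨b, hb, hne, hm⟩))
        · exact Or.inr ((dupP_cons a rest).2 (Or.inr (Or.inl ⟨b, hc, hne⟩)))
      · intro s' hs'
        rw [hstep] at hs'; exact absurd hs' (by simp)
    | some s1 =>
      have hnF : ¬ ((∃ b ∈ rest, a ≠ b ∧ canonPair a b ∈ s) ∨
          (∃ b, 2 ≤ rest.count b ∧ a ≠ b)) := by
        intro h
        rw [(hps.1).2 h] at hscan
        exact absurd hscan (by simp)
      have hF1 : ¬ (∃ b ∈ rest, a ≠ b ∧ canonPair a b ∈ s) := fun h => hnF (Or.inl h)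
      have hF2 : ¬ (∃ b, 2 ≤ rest.count b ∧ a ≠ b) := fun h => hnF (Or.inr h)
      have hs1 := hps.2 s1 hscan
      have hstep : bGroupPairs (a :: rest) s = bGroupPairs rest s1 := by
        simp only [bGroupPairs, hscan]
      have hCiff :
          ((∃ u ∈ rest, ∃ v ∈ rest, u ≠ v ∧ canonPair u v ∈ s1) ∨
            (∃ g, 2 ≤ rest.count g ∧ ∃ h ∈ rest, h ≠ g)) ↔
          ((∃ u ∈ a :: rest, ∃ v ∈ a :: rest, u ≠ v ∧ canonPair u v ∈ s) ∨
            (∃ g, 2 ≤ (a :: rest).count g ∧ ∃ h ∈ a :: rest, h ≠ g)) := by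
        rw [pairterm_cons _ (hmemP s) a rest, dupP_cons]
        constructor
        · rintro (⟨u, hu, v, hv, huv, hm⟩ | ⟨g, hc, h, hh, hne⟩)
          · rcases (hs1 (canonPair u v)).1 hm with hm' | ⟨b, hb, hne, he⟩
            · exact Or.inl (Or.inr ⟨u, hu, v, hv, huv, hm'⟩)
            · rcases (canon_eq_iff huv hne).1 he with ⟨h1, h2⟩ | ⟨h1, h2⟩
              · exact Or.inr (Or.inl ⟨h1 ▸ hu, v, hv, fun e => (h1 ▸ huv) e.symm⟩)
              · exact Or.inr (Or.inl ⟨h2 ▸ hv, u, hu, h2 ▸ huv⟩)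
          · by_cases hag : a = g
            · have ha : a ∈ rest := List.count_pos_iff.1 (by rw [hag]; omega)
              exact Or.inr (Or.inl ⟨ha, h, hh, hag ▸ hne⟩)
            · exact absurd ⟨g, hc, hag⟩ hF2
        · rintro ((⟨b, hb, hne, hm⟩ | ⟨u, hu, v, hv, huv, hm⟩) | ⟨ha, h, hh, hne⟩ | ⟨g, hc, hne⟩ | hd)
          · exact absurd ⟨b, hb, hne, hm⟩ hF1
          · exact Or.inl ⟨u, hu, v, hv, huv, (hs1 _).2 (Or.inl hm)⟩
          · exact Or.inl ⟨a, ha, h, hh, fun e => hne e.symm,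
              (hs1 _).2 (Or.inr ⟨h, hh, fun e => hne e.symm, rfl⟩)⟩
          · exact absurd ⟨g, hc, hne⟩ hF2
          · exact Or.inr hd
      refine ⟨?_, ?_⟩
      · rw [hstep, (ih s1).1, hCiff]
      · intro s' hs' x
        rw [hstep] at hs'
        rw [(ih s1).2 s' hs' x, hs1 x,
          pairterm_cons (fun u v => x = canonPair u v) (heqP x) a rest]
        constructor
        · rintro ((hx | ⟨b, hb, hne, he⟩) | ⟨u, hu, v, hv, huv, he⟩)
          · exact Or.inl hx
          · exact Or.inr (Or.inl ⟨b, hb, hne, he⟩)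
          · exact Or.inr (Or.inr ⟨u, hu, v, hv, huv, he⟩)
        · rintro (hx | ⟨b, hb, hne, he⟩ | ⟨u, hu, v, hv, huv, he⟩)
          · exact Or.inl (Or.inl hx)
          · exact Or.inl (Or.inr ⟨b, hb, hne, he⟩)
          · exact Or.inr ⟨u, hu, v, hv, huv, he⟩

-- one group, related states: same failure behaviour, related successor states
lemma group_step (allG : PySem.Set Int) (grp : List Int)
    (d : PySem.Dict Int (PySem.Set Int)) (s : PySem.Set (Int × Int)) (hrel : SGRel d s) :
    (aGolfers allG grp grp d = none ↔
      (¬ grp.all (fun g => PySem.Set.contains allG g) = true) ∨ bGroupPairs grp s = none) ∧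
    (∀ d' s', aGolfers allG grp grp d = some d' → bGroupPairs grp s = some s' → SGRel d' s') := by
  have hA := aGolfers_spec allG grp grp d
  have hB := bGroupPairs_spec grp s
  have hmem : (¬ grp.all (fun g => PySem.Set.contains allG g) = true) ↔
      ∃ g ∈ grp, ¬ PySem.Set.contains allG g = true := by
    rw [List.all_eq_true]
    push_neg
    exact Iff.rfl
  have hconf : (∃ g ∈ grp, ∃ h ∈ grp, h ≠ g ∧ h ∈ d.getD g PySem.Set.empty) ↔
      (∃ a ∈ grp, ∃ b ∈ grp, a ≠ b ∧ canonPair a b ∈ s) := by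
    constructor
    · rintro ⟨g, hg, h, hh, hne, hm⟩
      exact ⟨g, hg, h, hh, fun e => hne e.symm, (hrel g h (fun e => hne e.symm)).1 hm⟩
    · rintro ⟨a, ha, b, hb, hne, hm⟩
      exact ⟨a, ha, b, hb, fun e => hne e.symm, (hrel a b hne).2 hm⟩
  refine ⟨?_, ?_⟩
  · rw [hA.1, hB.1, hmem, hconf]
  · intro d' s' hd' hs' g h hgh
    rw [hA.2 d' hd' g h, hB.2 s' hs' (canonPair g h), hrel g h hgh]
    constructor
    · rintro (hm | ⟨hg, hh, hne⟩)
      · exact Or.inl hm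
      · exact Or.inr ⟨g, hg, h, hh, hgh, rfl⟩
    · rintro (hm | ⟨a, ha, b, hb, hne, he⟩)
      · exact Or.inl hm
      · rcases (canon_eq_iff hgh hne).1 he with ⟨h1, h2⟩ | ⟨h1, h2⟩
        · exact Or.inr ⟨h1 ▸ ha, h2 ▸ hb, fun e => hgh e.symm⟩
        · exact Or.inr ⟨h1 ▸ hb, h2 ▸ ha, fun e => hgh e.symm⟩
  

lemma groups_rel (allG : PySem.Set Int) (gsz : Nat) :
    ∀ (groups : List (List Int)) (d : PySem.Dict Int (PySem.Set Int))
      (s : PySem.Set (Int × Int)), SGRel d s →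
      (aGroups allG gsz groups d = none ↔ bGroups allG gsz groups s = none) ∧
      (∀ d' s', aGroups allG gsz groups d = some d' → bGroups allG gsz groups s = some s' → SGRel d' s') := by
  intro groups
  induction groups with
  | nil =>
    intro d s hrel
    refine ⟨by simp [aGroups, bGroups], ?_⟩
    intro d' s' hd' hs'
    simp only [aGroups, Option.some.injEq] at hd'
    simp only [bGroups, Option.some.injEq] at hs'
    subst hd'; subst hs'
    exact hrel
  | cons grp rest ih =>
    intro d s hrel
    by_cases hsz : grp.length ≠ gsz
    · have ha : aGroups allG gsz (grp :: rest) d = none := by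
        simp only [aGroups, if_pos hsz]
      have hb : bGroups allG gsz (grp :: rest) s = none := by
        simp only [bGroups, if_pos hsz]
      refine ⟨by simp [ha, hb], ?_⟩
      intro d' s' hd'
      rw [ha] at hd'; exact absurd hd' (by simp)
    · have hgs := group_step allG grp d s hrel
      cases hga : aGolfers allG grp grp d with
      | none =>
        have ha : aGroups allG gsz (grp :: rest) d = none := by
          simp only [aGroups, if_neg hsz, hga]
        have hb : bGroups allG gsz (grp :: rest) s = none := by
          rcases hgs.1.1 hga with hnall | hbgp
          · simp only [bGroups, if_neg hsz, if_pos hnall]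
          · by_cases hall : grp.all (fun g => PySem.Set.contains allG g) = true
            · simp only [bGroups, if_neg hsz, if_neg (not_not_intro hall), hbgp]
            · simp only [bGroups, if_neg hsz, if_pos hall]
        refine ⟨by simp [ha, hb], ?_⟩
        intro d' s' hd'
        rw [ha] at hd'; exact absurd hd' (by simp)
      | some d1 =>
        have hnn : ¬ ((¬ grp.all (fun g => PySem.Set.contains allG g) = true) ∨
            bGroupPairs grp s = none) := by
          intro h
          rw [hgs.1.2 h] at hga
          exact absurd hga (by simp)
        have hall : grp.all (fun g => PySem.Set.contains allG g) = true := by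
          by_contra hc
          exact hnn (Or.inl hc)
        cases hbgp : bGroupPairs grp s with
        | none => exact absurd (Or.inr hbgp) hnn
        | some s1 =>
          have ha : aGroups allG gsz (grp :: rest) d = aGroups allG gsz rest d1 := by
            simp only [aGroups, if_neg hsz, hga]
          have hb : bGroups allG gsz (grp :: rest) s = bGroups allG gsz rest s1 := by
            simp only [bGroups, if_neg hsz, if_neg (not_not_intro hall), hbgp]
          have hrel1 := hgs.2 d1 s1 hga hbgp
          refine ⟨?_, ?_⟩
          · rw [ha, hb]
            exact (ih d1 s1 hrel1).1
          · intro d' s' hd' hs'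
            rw [ha] at hd'; rw [hb] at hs'
            exact (ih d1 s1 hrel1).2 d' s' hd' hs'

lemma days_rel (allG : PySem.Set Int) (ng gsz : Nat) :
    ∀ (days : List (List (List Int))) (d : PySem.Dict Int (PySem.Set Int))
      (s : PySem.Set (Int × Int)), SGRel d s →
      ((aDays allG ng gsz days d).isSome = (bDays allG ng gsz days s).isSome) := by
  intro days
  induction days with
  | nil => intro d s _; simp [aDays, bDays]
  | cons day rest ih =>
    intro d s hrel
    by_cases hlen : day.length ≠ ng
    · simp only [aDays, bDays, if_pos hlen]
      rfl
    · have hgr := groups_rel allG gsz day d s hrel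
      cases hag : aGroups allG gsz day d with
      | none =>
        have hbg : bGroups allG gsz day s = none := hgr.1.1 hag
        simp only [aDays, bDays, if_neg hlen, hag, hbg]
        rfl
      | some d1 =>
        cases hbg : bGroups allG gsz day s with
        | none =>
          rw [hgr.1.2 hbg] at hag
          exact absurd hag (by simp)
        | some s1 =>
          have hrel1 := hgr.2 d1 s1 hag hbg
          simp only [aDays, bDays, if_neg hlen, hag, hbg]
          exact ih d1 s1 hrel1

lemma rel_empty : SGRel PySem.Dict.empty PySem.Set.empty := by
  intro g h _
  simp [PySem.Dict.getD, PySem.Dict.empty, PySem.Dict.get?, PySem.Set.empty]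

-- ===== VERDICT (by name: the statement is the Claim_ definition above) =====
theorem is_valid_social_golfer_solution_spec : Claim_equal_is_valid_social_golfer_solution := by
  intro solution _
  unfold Spec_is_valid_social_golfer_solution
  unfold is_valid_social_golfer_solution is_valid_social_golfer_solution_alt
  cases solution with
  | nil => rfl
  | cons day0 rest =>
    cases day0 with
    | nil => rfl
    | cons g0 grest =>
      by_cases h : g0.length = 0
      · simp [h]
      · simp only [h, if_false]
        rw [days_rel _ _ _ _ _ _ rel_empty]
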